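-- pv_equiv track=rewrite | github.com/elsieoduor/codility | angryfrog.py | solution
-- ===== SOURCE A (Python) =====
-- def solution(blocks):
--     max_distance = 0
--
--     for i in range(len(blocks)):
--         left, right = i, i
--
--         while left > 0 and blocks[left] >= blocks[left - 1]:
--             left -= 1
--
--         while right < len(blocks) - 1 and blocks[right] >= blocks[right + 1]:
--             right += 1
--
--         max_distance = max(max_distance, right - left + 1)
--
--     return max_distance
-- ===== SOURCE B (Python) =====
-- def solution(blocks):
--     n = len(blocks)
--     if n == 0:
--         return 0
--     # L[i] = leftmost index reachable from i (non-decreasing run towards the left)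
--     L = [0] * n
--     for i in range(1, n):
--         L[i] = L[i - 1] if blocks[i] >= blocks[i - 1] else i
--     # R[i] = rightmost index reachable from i
--     R = [0] * n
--     R[n - 1] = n - 1
--     for i in range(n - 2, -1, -1):
--         R[i] = R[i + 1] if blocks[i] >= blocks[i + 1] else i
--     best = 0
--     for i in range(n):
--         best = max(best, R[i] - L[i] + 1)
--     return best
-- ===== Notes on version B (the rewrite author's own statement) =====
-- stated objective: faster
-- what changed: Replaced per-index while-loop scans with two linear DP passes building left/right reach arrays, then one pass combining them.
import Mathlib
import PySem

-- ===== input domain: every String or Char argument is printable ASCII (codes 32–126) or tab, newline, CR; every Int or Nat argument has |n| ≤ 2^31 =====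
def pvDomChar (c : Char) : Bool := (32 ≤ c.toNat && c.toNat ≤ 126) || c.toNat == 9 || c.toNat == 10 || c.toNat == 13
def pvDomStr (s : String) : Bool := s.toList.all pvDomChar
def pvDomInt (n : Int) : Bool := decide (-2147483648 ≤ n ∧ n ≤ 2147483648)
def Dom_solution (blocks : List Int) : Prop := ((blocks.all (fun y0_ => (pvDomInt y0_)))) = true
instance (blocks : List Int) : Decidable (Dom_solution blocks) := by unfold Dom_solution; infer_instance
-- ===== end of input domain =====

-- B replaces A's per-index quadratic while-loop scans by two linear DP passes (left/right
-- reach arrays) plus a combining pass; proved to return the same value on every input.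

-- ===== PORT A =====
-- inner 'while left > 0 and blocks[left] >= blocks[left-1]': indices are always in range,
-- so blocks.getD is exact for Python's blocks[i] here
def goLeft (blocks : List Int) : Nat → Nat
  | 0 => 0
  | (l+1) => if blocks.getD (l+1) 0 ≥ blocks.getD l 0 then goLeft blocks l else l + 1

-- inner 'while right < len(blocks)-1 and blocks[right] >= blocks[right+1]'
def goRight (blocks : List Int) (r : Nat) : Nat :=
  if h : r < blocks.length - 1 ∧ blocks.getD r 0 ≥ blocks.getD (r+1) 0 then
    goRight blocks (r+1)
  else r
termination_by blocks.length - 1 - r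
decreasing_by omega

def solution (blocks : List Int) : Int :=
  (List.range blocks.length).foldl
    (fun md i => max md ((goRight blocks i : Int) - (goLeft blocks i : Int) + 1)) 0

-- ===== PORT B =====
-- 'L[i] = L[i-1] if blocks[i] >= blocks[i-1] else i' for i = 1..n-1 (list built by appending)
def buildL (blocks : List Int) (n : Nat) : List Nat :=
  (List.range' 1 (n - 1)).foldl
    (fun acc i => acc ++ [if blocks.getD i 0 ≥ blocks.getD (i-1) 0 then acc.getD (i-1) 0 else i])
    [0]

-- 'R[i] = R[i+1] if blocks[i] >= blocks[i+1] else i' for i = n-2..0 (list built by prepending)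
def buildR (blocks : List Int) (n : Nat) : List Nat :=
  ((List.range' 0 (n - 1)).reverse).foldl
    (fun acc i => (if blocks.getD i 0 ≥ blocks.getD (i+1) 0 then acc.headD 0 else i) :: acc)
    [n - 1]

def solution_alt (blocks : List Int) : Int :=
  let n := blocks.length
  if n = 0 then 0
  else
    let L := buildL blocks n
    let R := buildR blocks n
    (List.range n).foldl
      (fun best i => max best ((R.getD i 0 : Int) - (L.getD i 0 : Int) + 1)) 0

-- ===== PRECONDITION & SPEC =====
def Spec_solution (blocks : List Int) (out : Int) : Prop := out = solution_alt blocks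
instance (blocks : List Int) (out : Int) : Decidable (Spec_solution blocks out) := by unfold Spec_solution; infer_instance

-- ===== CLAIM (what is proved, stated in full; the proofs are below) =====
def Claim_equal_solution : Prop := ∀ (blocks : List Int), Dom_solution blocks → Spec_solution blocks (solution blocks)

-- ===== LEMMAS AND PROOFS =====

theorem getD_map_range (f : Nat → Nat) (m i : Nat) (h : i < m) :
    ((List.range m).map f).getD i 0 = f i := by
  simp [List.getD_eq_getElem?_getD, h]

theorem buildL_prefix (blocks : List Int) (m : Nat) :
    (List.range' 1 m).foldl
      (fun acc i => acc ++ [if blocks.getD i 0 ≥ blocks.getD (i-1) 0 then acc.getD (i-1) 0 else i])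
      [0]
    = (List.range (m + 1)).map (goLeft blocks) := by
  induction m with
  | zero => simp [goLeft]
  | succ k ih =>
    rw [List.range'_concat, List.foldl_append, ih]
    simp only [List.foldl_cons, List.foldl_nil]
    have hk1 : 1 + 1 * k = k + 1 := by ring
    have hidx : k + 1 - 1 = k := by omega
    have hget : ((List.range (k + 1)).map (goLeft blocks)).getD k 0 = goLeft blocks k :=
      getD_map_range _ _ _ (by omega)
    rw [List.range_succ (n := k + 1), List.map_append]
    simp only [hk1, hidx, hget, List.map_cons, List.map_nil]
    by_cases hc : blocks.getD (k+1) 0 ≥ blocks.getD k 0 <;> simp [goLeft, hc]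

theorem buildL_eq (blocks : List Int) (n : Nat) (hn : 1 ≤ n) :
    buildL blocks n = (List.range n).map (goLeft blocks) := by
  unfold buildL
  have : n - 1 + 1 = n := by omega
  rw [buildL_prefix blocks (n - 1), this]

theorem goRight_last (blocks : List Int) (r : Nat) (h : ¬ r < blocks.length - 1) :
    goRight blocks r = r := by
  rw [goRight]; simp [h]

theorem buildR_suffix (blocks : List Int) (n : Nat) (hn : 1 ≤ n) (hl : blocks.length = n)
    (m k : Nat) (hk : k + m = n - 1) :
    (List.range' k m).foldr
      (fun i acc => (if blocks.getD i 0 ≥ blocks.getD (i+1) 0 then acc.headD 0 else i) :: acc)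
      [n - 1]
    = (List.range' k (m + 1)).map (goRight blocks) := by
  induction m generalizing k with
  | zero =>
    have hk' : k = n - 1 := by omega
    subst hk'
    simp [goRight_last blocks (n-1) (by omega)]
  | succ j ih =>
    rw [List.range'_succ, List.foldr_cons, ih (k+1) (by omega)]
    have hne : (List.range' (k+1) (j+1)).map (goRight blocks)
        = goRight blocks (k+1) :: (List.range' (k+2) j).map (goRight blocks) := by
      rw [List.range'_succ]; simp
    rw [hne]
    have hgr : goRight blocks k
        = if blocks.getD k 0 ≥ blocks.getD (k+1) 0 then goRight blocks (k+1) else k := by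
      rw [goRight]
      have : k < blocks.length - 1 := by omega
      by_cases hc : blocks.getD k 0 ≥ blocks.getD (k+1) 0 <;> simp [this]
    have hrng : (List.range' k (j + 1 + 1)).map (goRight blocks)
        = goRight blocks k :: goRight blocks (k+1) :: (List.range' (k+2) j).map (goRight blocks) := by
      rw [List.range'_succ, List.range'_succ]; simp
    rw [hrng, hgr]
    split <;> simp

theorem buildR_eq (blocks : List Int) (n : Nat) (hn : 1 ≤ n) (hl : blocks.length = n) :
    buildR blocks n = (List.range n).map (goRight blocks) := by
  unfold buildR
  rw [List.foldl_reverse]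
  have := buildR_suffix blocks n hn hl (n - 1) 0 (by omega)
  have hr : List.range n = List.range' 0 n := by simp [List.range_eq_range']
  have hn' : n - 1 + 1 = n := by omega
  rw [this, hn', hr]

theorem solution_eq_alt (blocks : List Int) : solution blocks = solution_alt blocks := by
  unfold solution solution_alt
  by_cases h0 : blocks.length = 0
  · simp [h0]
  · have hn : 1 ≤ blocks.length := by omega
    simp only [h0, if_false]
    rw [buildL_eq blocks blocks.length hn, buildR_eq blocks blocks.length hn rfl]
    apply PySem.List.foldl_congr_mem
    intro acc i hi
    have hi' : i < blocks.length := List.mem_range.mp hi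
    rw [getD_map_range _ _ _ hi', getD_map_range _ _ _ hi']

-- ===== VERDICT (by name: the statement is the Claim_ definition above) =====
theorem solution_spec : Claim_equal_solution := by
  intro blocks _
  unfold Spec_solution
  exact solution_eq_alt blocks
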